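-- pv_equiv track=rewrite | github.com/Peijin-Jiang/wind_dMFA | offshore_env_impact.py | aggregate_seq
-- ===== SOURCE A (Python) =====
-- def aggregate_seq(seq, time):
--     seq_, time_ = [0, 0, 0], ['2020-2030', '2030-2040', '2040-2050']
--
--     for i in range(len(seq)):
--         if time[i] < 2030:
--             seq_[0] += seq[i]
--         elif time[i] < 2040:
--             seq_[1] += seq[i]
--         else:
--             seq_[2] += seq[i]
--     return seq_, time_
-- ===== SOURCE B (Python) =====
-- def aggregate_seq(seq, time):
--     seq_0 = sum(seq[i] for i in range(len(seq)) if time[i] < 2030)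
--     seq_1 = sum(seq[i] for i in range(len(seq)) if 2030 <= time[i] < 2040)
--     seq_2 = sum(seq[i] for i in range(len(seq)) if time[i] >= 2040)
--     return [seq_0, seq_1, seq_2], ['2020-2030', '2030-2040', '2040-2050']
-- ===== Notes on version B (the rewrite author's own statement) =====
-- stated objective: alternative
-- what changed: Replaces the single interleaved three-way bucketing loop over a mutable list with three independent filtered sum-comprehensions, one per decade bucket.
import Mathlib
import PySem

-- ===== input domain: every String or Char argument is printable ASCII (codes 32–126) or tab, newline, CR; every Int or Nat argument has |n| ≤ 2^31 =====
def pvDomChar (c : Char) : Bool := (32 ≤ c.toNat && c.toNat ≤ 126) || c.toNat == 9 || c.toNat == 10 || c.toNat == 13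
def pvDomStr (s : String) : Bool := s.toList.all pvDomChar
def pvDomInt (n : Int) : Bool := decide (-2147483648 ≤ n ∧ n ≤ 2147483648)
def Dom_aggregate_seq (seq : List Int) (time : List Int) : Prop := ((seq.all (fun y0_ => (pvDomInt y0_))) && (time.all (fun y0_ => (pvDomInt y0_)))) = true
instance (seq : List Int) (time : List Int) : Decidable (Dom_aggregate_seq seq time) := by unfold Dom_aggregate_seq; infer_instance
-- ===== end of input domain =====

-- B replaces A's single interleaved three-way bucketing loop with three independent
-- filtered sums, one per decade bucket (objective: alternative decomposition; same cost).

-- ===== PORT A =====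
-- one loop over range(len(seq)), three mutable accumulators (seq_[0..2]); time[i] total via getD 0, in range under Pre_
def aggregate_seq (seq : List Int) (time : List Int) : List Int × List String :=
  let s := (PySem.List.pyRange 0 seq.length 1).foldl (fun st i =>
    let t := PySem.List.pyGetD time i 0
    let v := PySem.List.pyGetD seq i 0
    if t < 2030 then (st.1 + v, st.2.1, st.2.2)
    else if t < 2040 then (st.1, st.2.1 + v, st.2.2)
    else (st.1, st.2.1, st.2.2 + v)) (0, 0, 0)
  ([s.1, s.2.1, s.2.2], ["2020-2030", "2030-2040", "2040-2050"])

-- ===== PORT B =====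
-- sum(seq[i] for i in range(len(seq)) if p(time[i]))
def pvBucketSum (seq : List Int) (time : List Int) (p : Int → Bool) : Int :=
  ((((PySem.List.pyRange 0 seq.length 1).filter
      (fun i => p (PySem.List.pyGetD time i 0))).map
      (fun i => PySem.List.pyGetD seq i 0)).sum)

def aggregate_seq_alt (seq : List Int) (time : List Int) : List Int × List String :=
  let seq_0 := pvBucketSum seq time (fun t => t < 2030)
  let seq_1 := pvBucketSum seq time (fun t => 2030 ≤ t && t < 2040)
  let seq_2 := pvBucketSum seq time (fun t => 2040 ≤ t)
  ([seq_0, seq_1, seq_2], ["2020-2030", "2030-2040", "2040-2050"])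

-- ===== PRECONDITION & SPEC =====
-- A raises IndexError (time[i]) whenever time is shorter than seq; exactly those inputs are excluded.
def Pre_aggregate_seq (seq : List Int) (time : List Int) : Prop := seq.length ≤ time.length
instance (seq : List Int) (time : List Int) : Decidable (Pre_aggregate_seq seq time) := by unfold Pre_aggregate_seq; infer_instance
def pvWitness_aggregate_seq : List Int × List Int := ([1, 2, 3], [2025, 2035, 2045])

def Spec_aggregate_seq (seq : List Int) (time : List Int) (out : List Int × List String) : Prop := out = aggregate_seq_alt seq time
instance (seq : List Int) (time : List Int) (out : List Int × List String) : Decidable (Spec_aggregate_seq seq time out) := by unfold Spec_aggregate_seq; infer_instance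

-- ===== CLAIM (what is proved, stated in full; the proofs are below) =====
def Claim_equal_aggregate_seq : Prop := ∀ (seq : List Int) (time : List Int), Dom_aggregate_seq seq time → Pre_aggregate_seq seq time → Spec_aggregate_seq seq time (aggregate_seq seq time)

-- ===== LEMMAS AND PROOFS =====

-- A's single fold splits into the three filtered sums, for any index list and any start accumulators.
theorem pv_fold_split (time : List Int) (g : Int → Int) (l : List Int) (a b c : Int) :
    l.foldl (fun st i =>
        let t := PySem.List.pyGetD time i 0
        let v := g i
        if t < 2030 then (st.1 + v, st.2.1, st.2.2)
        else if t < 2040 then (st.1, st.2.1 + v, st.2.2)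
        else (st.1, st.2.1, st.2.2 + v)) (a, b, c)
    = (a + ((l.filter (fun i => PySem.List.pyGetD time i 0 < 2030)).map g).sum,
       b + ((l.filter (fun i => (2030 ≤ PySem.List.pyGetD time i 0) && (PySem.List.pyGetD time i 0 < 2040))).map g).sum,
       c + ((l.filter (fun i => 2040 ≤ PySem.List.pyGetD time i 0)).map g).sum) := by
  induction l generalizing a b c with
  | nil => simp
  | cons x xs ih =>
    simp only [List.foldl_cons, List.filter_cons]
    by_cases h1 : PySem.List.pyGetD time x 0 < 2030
    · simp [h1, ih, show ¬ (2030 ≤ PySem.List.pyGetD time x 0) by omega,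
        show ¬ (2040 ≤ PySem.List.pyGetD time x 0) by omega, add_assoc]
    · by_cases h2 : PySem.List.pyGetD time x 0 < 2040
      · simp [h1, h2, ih, show (2030 ≤ PySem.List.pyGetD time x 0) by omega,
          show ¬ (2040 ≤ PySem.List.pyGetD time x 0) by omega, add_assoc]
      · simp [h1, h2, ih, show (2040 ≤ PySem.List.pyGetD time x 0) by omega, add_assoc]

-- ===== VERDICT (by name: the statement is the Claim_ definition above) =====
theorem aggregate_seq_spec : Claim_equal_aggregate_seq := by
  intro seq time _ _
  unfold Spec_aggregate_seq aggregate_seq aggregate_seq_alt pvBucketSum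
  rw [pv_fold_split]
  simp
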